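-- pv_equiv track=rewrite | github.com/vmred/codewars | katas/6kyu/Remove the parentheses/solution.py | remove_parentheses
-- ===== SOURCE A (Python) =====
-- def remove_parentheses(s):
--     ret = ''
--     skip = 0
--     for i in s:
--         if i == '(':
--             skip += 1
--         elif i == ')' and skip > 0:
--             skip -= 1
--         elif skip == 0:
--             ret += i
--     return ret
-- ===== SOURCE B (Python) =====
-- def remove_parentheses(s):
--     out = []
--     i = 0
--     n = len(s)
--     while i < n:
--         c = s[i]
--         if c == '(':
--             i += 1
--             depth = 1
--             while i < n and depth > 0:
--                 if s[i] == '(':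
--                     depth += 1
--                 elif s[i] == ')':
--                     depth -= 1
--                 i += 1
--         else:
--             out.append(c)
--             i += 1
--     return ''.join(out)
-- ===== Notes on version B (the rewrite author's own statement) =====
-- stated objective: alternative
-- what changed: Replaces the single pass with a persistent depth counter by an index-based outer loop that, at each opening parenthesis, runs an inner skip loop with a local depth counter to jump past the whole parenthesized region, so the outer loop only ever copies characters at depth 0.
import Mathlib
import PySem

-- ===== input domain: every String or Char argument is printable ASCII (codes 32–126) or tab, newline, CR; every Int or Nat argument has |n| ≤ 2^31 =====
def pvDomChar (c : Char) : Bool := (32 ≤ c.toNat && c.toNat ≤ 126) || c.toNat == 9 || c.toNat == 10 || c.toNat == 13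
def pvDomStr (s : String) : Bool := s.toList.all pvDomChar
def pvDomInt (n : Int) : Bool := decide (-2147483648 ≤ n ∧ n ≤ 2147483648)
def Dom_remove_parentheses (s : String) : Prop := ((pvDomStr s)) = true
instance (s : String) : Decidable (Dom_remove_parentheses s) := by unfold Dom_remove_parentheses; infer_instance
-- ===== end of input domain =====

-- B replaces A's single pass with a persistent depth counter by an outer scan that, at each '(',
-- runs an inner skip loop with a local depth counter to jump past the whole region (objective: alternative).

-- ===== PORT A =====
-- state: (ret, skip); one step of A's for-loop body
def pvStepA (st : List Char × Nat) (i : Char) : List Char × Nat :=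
  if i = '(' then (st.1, st.2 + 1)
  else if i = ')' ∧ st.2 > 0 then (st.1, st.2 - 1)
  else if st.2 = 0 then (st.1 ++ [i], st.2)
  else st

def remove_parentheses (s : String) : String :=
  String.mk (s.toList.foldl pvStepA ([], 0)).1

-- ===== PORT B =====
-- inner while loop: advance past the region while depth > 0, returning the remaining suffix
def pvSkip : List Char → Nat → List Char
  | l, 0 => l
  | [], _ + 1 => []
  | c :: rest, Nat.succ d =>
      pvSkip rest (if c = '(' then d + 2 else if c = ')' then d else d + 1)

theorem pvSkip_length_le (l : List Char) (d : Nat) : (pvSkip l d).length ≤ l.length := by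
  induction l generalizing d with
  | nil => cases d <;> simp [pvSkip]
  | cons c rest ih =>
    cases d with
    | zero => simp [pvSkip]
    | succ d =>
      simp only [pvSkip]
      exact le_trans (ih _) (by simp)

-- outer while loop over the characters
def pvAltGo : List Char → List Char
  | [] => []
  | c :: rest =>
      if c = '(' then pvAltGo (pvSkip rest 1)
      else c :: pvAltGo rest
termination_by l => l.length
decreasing_by
  · exact Nat.lt_succ_of_le (pvSkip_length_le rest 1)
  · simp

def remove_parentheses_alt (s : String) : String :=
  String.mk (pvAltGo s.toList)

-- ===== PRECONDITION & SPEC =====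
def Spec_remove_parentheses (s : String) (out : String) : Prop := out = remove_parentheses_alt s
instance (s : String) (out : String) : Decidable (Spec_remove_parentheses s out) := by unfold Spec_remove_parentheses; infer_instance

-- ===== CLAIM (what is proved, stated in full; the proofs are below) =====
def Claim_equal_remove_parentheses : Prop := ∀ (s : String), Dom_remove_parentheses s → Spec_remove_parentheses s (remove_parentheses s)

-- ===== LEMMAS AND PROOFS =====

-- While A's counter is positive, A appends nothing; the fold from skip = d+1 builds the same
-- output as the fold from skip = 0 on the suffix B's inner loop leaves behind.
theorem foldA_pos (l : List Char) (d : Nat) (ret : List Char) :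
    (List.foldl pvStepA (ret, d + 1) l).1 = (List.foldl pvStepA (ret, 0) (pvSkip l (d + 1))).1 := by
  induction l generalizing d with
  | nil => simp [pvSkip]
  | cons c rest ih =>
    by_cases hp : c = '('
    · simp only [List.foldl, pvStepA, hp, pvSkip, if_pos]
      simpa using ih (d + 1)
    · by_cases hc : c = ')'
      · cases d with
        | zero => simp [List.foldl, pvStepA, hc, pvSkip]
        | succ d' =>
          simp only [List.foldl, pvStepA, hc, pvSkip]
          simpa using ih d'
      · simp only [List.foldl, pvStepA, hc, pvSkip]
        simpa [hp, hc] using ih d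

-- At skip = 0, A's fold accumulates exactly what B's outer loop emits.
theorem foldA_zero (l : List Char) (ret : List Char) :
    (List.foldl pvStepA (ret, 0) l).1 = ret ++ pvAltGo l := by
  induction hn : l.length using Nat.strong_induction_on generalizing l ret with
  | _ n ih =>
    cases l with
    | nil => simp [pvAltGo]
    | cons c rest =>
      by_cases hp : c = '('
      · simp only [List.foldl, pvStepA, hp, pvAltGo, reduceIte]
        rw [show (0 : Nat) + 1 = 0 + 1 from rfl, foldA_pos rest 0 ret]
        exact ih (pvSkip rest 1).length
          (by subst hn; exact Nat.lt_succ_of_le (pvSkip_length_le rest 1)) _ _ rfl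
      · by_cases hc : c = ')'
        · have h1 := ih rest.length (by subst hn; simp) rest (ret ++ [c]) rfl
          subst hc
          simp [List.foldl, pvStepA, pvAltGo, h1]
        · have h1 := ih rest.length (by subst hn; simp) rest (ret ++ [c]) rfl
          simp [List.foldl, pvStepA, pvAltGo, hp, hc, h1]

-- ===== VERDICT (by name: the statement is the Claim_ definition above) =====
theorem remove_parentheses_spec : Claim_equal_remove_parentheses := by
  intro s _
  unfold Spec_remove_parentheses remove_parentheses remove_parentheses_alt
  rw [foldA_zero]
  simp
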